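-- pv_equiv track=rewrite | github.com/SJF-ECNU/DaSE-Introduction | lesson2/question1.py | max_list
-- ===== SOURCE A (Python) =====
-- def divide(input_num):
--     if input_num % 2 == 0:
--         return int(input_num / 2)
--     else:
--         return int((input_num + 1) / 2)
--
-- def max_list(input_num):
--     my_dict = {}
--     my_dict[input_num] = my_dict.get(input_num, 0) + 1  # 通过字典记录输入的数值
--
--     while True:  # 通过循环来实现而不是递归，递归的时间开销更大
--         max_key = max(my_dict.keys())  # 找到字典中最大的键值
--         if max_key <= 3:  # 检测这个键值是否大于3，如果没有大于3的，说明已经分解完成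
--             break
--
--         new_input = divide(max_key)
--         my_dict[new_input] = my_dict.get(new_input, 0) + 1
--         my_dict[max_key - new_input] = my_dict.get(max_key - new_input, 0) + 1
--         my_dict[max_key] -= 1
--
--         if my_dict[max_key] == 0:
--             del my_dict[max_key]
--     return my_dict
-- ===== SOURCE B (Python) =====
-- def max_list(input_num):
--     # Closed-form: find the depth d at which balanced halving of n bottoms out;
--     # the leaf counts are then arithmetic in n.
--     n = input_num
--     if n <= 3:
--         return {n: 1}
--     v, d = n, 0
--     while v > 3:
--         v //= 2
--         d += 1
--     p = 2 ** d
--     r = n - v * p          # number of "ceil" nodes at depth d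
--     res = {}
--     if v == 3:
--         res[3] = p - r
--         if r:
--             res[2] = 2 * r
--     else:
--         if r:
--             res[3] = r
--         res[2] = p - r
--     return res
-- ===== Notes on version B (the rewrite author's own statement) =====
-- stated objective: faster
-- what changed: A simulates the whole decomposition with a dict, repeatedly splitting the current maximum key one count at a time (about n/2 iterations); B computes the result in closed form: it halves n until the quotient drops below the splitting threshold (O(log n) steps) and obtains the leaf counts by arithmetic from n's position between powers of two.
import Mathlib
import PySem

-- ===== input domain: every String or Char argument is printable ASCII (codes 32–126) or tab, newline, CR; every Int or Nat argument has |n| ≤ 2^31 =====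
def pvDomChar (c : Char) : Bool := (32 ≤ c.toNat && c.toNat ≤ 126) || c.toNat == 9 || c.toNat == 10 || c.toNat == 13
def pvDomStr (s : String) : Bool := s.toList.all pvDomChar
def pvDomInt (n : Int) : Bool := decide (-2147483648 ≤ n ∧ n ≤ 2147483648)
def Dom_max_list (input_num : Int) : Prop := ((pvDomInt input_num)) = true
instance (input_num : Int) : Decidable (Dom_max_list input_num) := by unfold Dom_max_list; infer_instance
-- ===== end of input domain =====

-- B replaces A's dict-driven splitting simulation (~n/2 iterations) by a closed-form
-- computation of the leaf counts from n's position between powers of two (objective: faster).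


-- ===== PORT A =====
-- int(x / 2) is truncation toward zero (Int.tdiv); exact on Dom, where the float x/2 is exact.
def divide (input_num : Int) : Int :=
  if PySem.Int.mod input_num 2 == 0 then Int.tdiv input_num 2
  else Int.tdiv (input_num + 1) 2

-- one iteration of A's while-loop body, splitting the current maximal key m
def aStep (d : PySem.Dict Int Int) (m : Int) : PySem.Dict Int Int :=
  let nw := divide m
  let d1 := d.insert nw (d.getD nw 0 + 1)
  let d2 := d1.insert (m - nw) (d1.getD (m - nw) 0 + 1)
  let d3 := d2.insert m (d2.getD m 0 - 1)
  if d3.getD m 0 == 0 then d3.erase m else d3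

-- A's `while True` loop; the fuel is only a totality guard (proved sufficient below):
-- each iteration consumes one unit, and the `none`/fuel-0 branches are never reached.
def aLoop : Nat → PySem.Dict Int Int → PySem.Dict Int Int
  | 0, d => d
  | fuel + 1, d =>
    match PySem.List.max? d.keys (fun x => x) with
    | none => d
    | some m => if m ≤ 3 then d else aLoop fuel (aStep d m)

def max_list (input_num : Int) : List (Int × Int) :=
  let d0 := (PySem.Dict.empty : PySem.Dict Int Int).insert input_num
      ((PySem.Dict.empty : PySem.Dict Int Int).getD input_num 0 + 1)
  (aLoop (input_num.natAbs + 1) d0).items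

-- ===== PORT B =====
-- B's `while v > 3: v //= 2; d += 1`
def altFind (v : Int) (d : Nat) : Int × Nat :=
  if h : 3 < v then altFind (PySem.Int.floordiv v 2) (d + 1) else (v, d)
termination_by v.toNat
decreasing_by
  rw [PySem.Int.floordiv_eq_ediv_of_pos (by omega)]
  omega

def max_list_alt (input_num : Int) : List (Int × Int) :=
  let n := input_num
  if n ≤ 3 then [(n, 1)]
  else
    let vd := altFind n 0
    let v := vd.1
    let d := vd.2
    let p : Int := 2 ^ d      -- 2 ** d
    let r := n - v * p
    if v = 3 then
      (3, p - r) :: (if r ≠ 0 then [(2, 2 * r)] else [])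
    else
      (if r ≠ 0 then [(3, r)] else []) ++ [(2, p - r)]

-- ===== PRECONDITION & SPEC =====
def Spec_max_list (input_num : Int) (out : List (Int × Int)) : Prop := out = max_list_alt input_num
instance (input_num : Int) (out : List (Int × Int)) : Decidable (Spec_max_list input_num out) := by unfold Spec_max_list; infer_instance

-- ===== CLAIM (what is proved, stated in full; the proofs are below) =====
def Claim_equal_max_list : Prop := ∀ (input_num : Int), Dom_max_list input_num → Spec_max_list input_num (max_list input_num)

-- ===== LEMMAS AND PROOFS =====

-- divide, on nonnegative input, is the ceiling half
theorem divide_eq {k : Int} (hk : 0 ≤ k) : divide k = (k + 1) / 2 := by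
  unfold divide
  by_cases h : PySem.Int.mod k 2 = 0
  · have h' : k % 2 = 0 := by rwa [PySem.Int.mod_eq_emod_of_pos (by omega)] at h
    simp only [h, beq_self_eq_true, if_true]
    rw [Int.tdiv_eq_ediv_of_nonneg hk]; omega
  · have h' : k % 2 = 1 := by
      rw [PySem.Int.mod_eq_emod_of_pos (by omega)] at h; omega
    have hb : (PySem.Int.mod k 2 == 0) = false := by simpa using h
    simp only [hb, Bool.false_eq_true, if_false]
    rw [Int.tdiv_eq_ediv_of_nonneg (by omega)]

theorem divide_bounds {k : Int} (hk : 4 ≤ k) :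
    2 ≤ divide k ∧ divide k < k ∧ 2 ≤ k - divide k ∧ k - divide k ≤ divide k := by
  rw [divide_eq (by omega)]; omega

-- leaf counts of the splitting tree of k: g3 = number of 3-leaves, g2 = number of 2-leaves
def g3 (k : Int) : Int :=
  if _h : k ≤ 3 then (if k = 3 then 1 else 0)
  else g3 (divide k) + g3 (k - divide k)
termination_by k.toNat
decreasing_by
  · have := divide_bounds (k := k) (by omega); omega
  · have := divide_bounds (k := k) (by omega); omega

def g2 (k : Int) : Int :=
  if _h : k ≤ 3 then (if k = 2 then 1 else 0)
  else g2 (divide k) + g2 (k - divide k)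
termination_by k.toNat
decreasing_by
  · have := divide_bounds (k := k) (by omega); omega
  · have := divide_bounds (k := k) (by omega); omega

-- weights used in the loop invariant: only keys > 3 contribute
def g3' (k : Int) : Int := if k ≤ 3 then 0 else g3 k
def g2' (k : Int) : Int := if k ≤ 3 then 0 else g2 k
def wt (k : Int) : Int := if k ≤ 3 then 0 else k - 1

-- Σ_{k ∈ keys} d[k] * f k
def gsum (f : Int → Int) (d : PySem.Dict Int Int) : Int :=
  (d.keys.map (fun j => d.getD j 0 * f j)).sum

-- pure (≤ 3) keys, in insertion order
def pureKeys (d : PySem.Dict Int Int) : List Int := d.keys.filter (fun k => decide (k ≤ 3))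

def extra (d : PySem.Dict Int Int) (k : Int) : Int :=
  if k = 3 then gsum g3' d else if k = 2 then gsum g2' d else 0

-- the value A's loop returns from state d (proved below): pure entries in order, each
-- absorbing the 3-/2-leaves still to be produced, then fresh 3- and 2-entries appended
def phi (d : PySem.Dict Int Int) : List (Int × Int) :=
  (pureKeys d).map (fun k => (k, d.getD k 0 + extra d k))
  ++ (if d.contains 3 = false ∧ 0 < gsum g3' d then [(3, gsum g3' d)] else [])
  ++ (if d.contains 2 = false ∧ 0 < gsum g2' d then [(2, gsum g2' d)] else [])

-- ---- generic list / dict bookkeeping ----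

theorem sum_map_update {l : List Int} {k : Int} (hnd : l.Nodup) (hk : k ∈ l)
    (f : Int → Int) (a : Int) :
    (l.map (fun j => if j = k then a else f j)).sum = (l.map f).sum - f k + a := by
  induction l with
  | nil => cases hk
  | cons x t ih =>
    by_cases hx : x = k
    · subst hx
      have hnx : x ∉ t := (List.nodup_cons.1 hnd).1
      have ht : t.map (fun j => if j = x then a else f j) = t.map f :=
        List.map_congr_left (fun j hj => by
          have : j ≠ x := fun h => hnx (h ▸ hj)
          simp [this])
      simp [ht]
      omega
    · have hkt : k ∈ t := by rcases List.mem_cons.1 hk with h | h; exact absurd h.symm hx; exact h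
      simp only [List.map_cons, List.sum_cons, if_neg hx]
      rw [ih (List.nodup_cons.1 hnd).2 hkt]; omega

theorem sum_map_filter_ne {l : List Int} {k : Int} (hnd : l.Nodup) (hk : k ∈ l) (f : Int → Int) :
    ((l.filter (fun j => !(j == k))).map f).sum = (l.map f).sum - f k := by
  induction l with
  | nil => cases hk
  | cons x t ih =>
    by_cases hx : x = k
    · subst hx
      have hnx : x ∉ t := (List.nodup_cons.1 hnd).1
      have ht : t.filter (fun j => !(j == x)) = t :=
        List.filter_eq_self.2 (fun j hj => by
          have : j ≠ x := fun h => hnx (h ▸ hj); simp [this])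
      simp [ht]
    · have hkt : k ∈ t := by rcases List.mem_cons.1 hk with h | h; exact absurd h.symm hx; exact h
      have hxb : (!(x == k)) = true := by simp [hx]
      simp only [List.filter_cons, hxb, if_pos, List.map_cons, List.sum_cons]
      rw [ih (List.nodup_cons.1 hnd).2 hkt]; ring

theorem keys_erase (d : PySem.Dict Int Int) (k : Int) :
    (d.erase k).keys = d.keys.filter (fun j => !(j == k)) := by
  simp [PySem.Dict.erase, PySem.Dict.keys]
  induction d.items with
  | nil => rfl
  | cons p t ih => by_cases h : p.1 = k <;> simp [List.filter_cons, h, ih]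

theorem find?_filter_ne {l : List (Int × Int)} {k j : Int} (h : j ≠ k) :
    (l.filter (fun p => !(p.1 == k))).find? (fun p => p.1 == j) = l.find? (fun p => p.1 == j) := by
  induction l with
  | nil => rfl
  | cons p t ih =>
    by_cases hp : p.1 = k
    · have hkj : k ≠ j := fun hh => h hh.symm
      simp [List.filter_cons, hp, List.find?_cons, hkj, ih, h, beq_iff_eq]
    · by_cases hj : p.1 = j
      · have hjk : ¬ (j = k) := h
        simp [List.filter_cons, hp, List.find?_cons, hj, hjk, beq_iff_eq]
      · have hjk : ¬ (j = k) := h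
        simp [List.filter_cons, hp, List.find?_cons, hj, hjk, ih, beq_iff_eq]

theorem getD_erase_ne (d : PySem.Dict Int Int) {k j : Int} (h : j ≠ k) :
    (d.erase k).getD j 0 = d.getD j 0 := by
  simp only [PySem.Dict.getD, PySem.Dict.get?, PySem.Dict.erase]
  rw [find?_filter_ne h]

theorem contains_erase_ne (d : PySem.Dict Int Int) {k j : Int} (h : j ≠ k) :
    (d.erase k).contains j = d.contains j := by
  rw [PySem.Dict.contains_eq_decide_mem_keys, PySem.Dict.contains_eq_decide_mem_keys, keys_erase]
  simp [List.mem_filter, h]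

theorem nodup_keys_erase (d : PySem.Dict Int Int) (k : Int) (hnd : d.keys.Nodup) :
    (d.erase k).keys.Nodup := by
  rw [keys_erase]; exact hnd.filter _

theorem gsum_insert (f : Int → Int) (d : PySem.Dict Int Int) (hnd : d.keys.Nodup) (k v : Int) :
    gsum f (d.insert k v) = gsum f d + (v - d.getD k 0) * f k := by
  by_cases hc : d.contains k
  · have hkeys := PySem.Dict.keys_insert_of_contains (d := d) (v := v) hc
    have hkm : k ∈ d.keys := (PySem.Dict.contains_iff_mem_keys d k).1 hc
    unfold gsum
    rw [hkeys]
    have hpt : d.keys.map (fun j => (d.insert k v).getD j 0 * f j)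
        = d.keys.map (fun j => if j = k then v * f j else d.getD j 0 * f j) :=
      List.map_congr_left (fun j hj => by
        rw [PySem.Dict.getD_insert]
        by_cases hjk : j = k <;> simp [hjk])
    rw [hpt]
    have : (d.keys.map (fun j => if j = k then v * f j else d.getD j 0 * f j)).sum
        = (d.keys.map (fun j => if j = k then v * f k else d.getD j 0 * f j)).sum := by
      congr 1; exact List.map_congr_left (fun j hj => by by_cases hjk : j = k <;> simp [hjk])
    rw [this, sum_map_update hnd hkm (fun j => d.getD j 0 * f j) (v * f k)]
    ring
  · have hcf : d.contains k = false := by simpa using hc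
    have hkeys := PySem.Dict.keys_insert_of_not_contains (d := d) (v := v) hcf
    have hd0 : d.getD k 0 = 0 := PySem.Dict.getD_of_not_contains _ _ hcf
    unfold gsum
    rw [hkeys, List.map_append, List.sum_append]
    have hpt : d.keys.map (fun j => (d.insert k v).getD j 0 * f j)
        = d.keys.map (fun j => d.getD j 0 * f j) :=
      List.map_congr_left (fun j hj => by
        have : j ≠ k := fun h => hc ((PySem.Dict.contains_iff_mem_keys d k).2 (h ▸ hj))
        rw [PySem.Dict.getD_insert, if_neg this])
    rw [hpt]
    simp [PySem.Dict.getD_insert, hd0]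

theorem gsum_erase_zero (f : Int → Int) (d : PySem.Dict Int Int) (hnd : d.keys.Nodup)
    {k : Int} (hk : k ∈ d.keys) (h0 : d.getD k 0 = 0) :
    gsum f (d.erase k) = gsum f d := by
  unfold gsum
  rw [keys_erase]
  have hpt : (d.keys.filter (fun j => !(j == k))).map (fun j => (d.erase k).getD j 0 * f j)
      = (d.keys.filter (fun j => !(j == k))).map (fun j => d.getD j 0 * f j) :=
    List.map_congr_left (fun j hj => by
      have : j ≠ k := by
        have := (List.mem_filter.1 hj).2; simpa using this
      rw [getD_erase_ne _ this])
  rw [hpt, sum_map_filter_ne hnd hk (fun j => d.getD j 0 * f j), h0]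
  ring

theorem gsum_nonneg (f : Int → Int) (d : PySem.Dict Int Int)
    (hc : ∀ j, 0 ≤ d.getD j 0) (hf : ∀ j, 0 ≤ f j) : 0 ≤ gsum f d := by
  unfold gsum
  apply List.sum_nonneg
  intro x hx
  obtain ⟨j, _, rfl⟩ := List.mem_map.1 hx
  exact mul_nonneg (hc j) (hf j)

theorem gsum_pos (f : Int → Int) (d : PySem.Dict Int Int)
    (hc : ∀ j, 0 ≤ d.getD j 0) (hf : ∀ j, 0 ≤ f j)
    {m : Int} (hm : m ∈ d.keys) (hm1 : 1 ≤ d.getD m 0) (hfm : 0 < f m) : 0 < gsum f d := by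
  unfold gsum
  have hmem : d.getD m 0 * f m ∈ d.keys.map (fun j => d.getD j 0 * f j) :=
    List.mem_map.2 ⟨m, hm, rfl⟩
  have := List.single_le_sum (l := d.keys.map (fun j => d.getD j 0 * f j))
    (fun x hx => by obtain ⟨j, _, rfl⟩ := List.mem_map.1 hx; exact mul_nonneg (hc j) (hf j))
    _ hmem
  nlinarith [hf m, hc m]

theorem gsum_eq_zero (f : Int → Int) (d : PySem.Dict Int Int)
    (h : ∀ j ∈ d.keys, f j = 0) : gsum f d = 0 := by
  unfold gsum
  rw [List.map_congr_left (fun j hj => by rw [h j hj, mul_zero]) ]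
  simp


-- ---- aStep analysis ----

theorem nodup_aStep (d : PySem.Dict Int Int) (m : Int) (hnd : d.keys.Nodup) :
    (aStep d m).keys.Nodup := by
  unfold aStep
  dsimp only
  split
  · exact nodup_keys_erase _ _ (PySem.Dict.nodup_keys_insert _ _ _ (PySem.Dict.nodup_keys_insert _ _ _ (PySem.Dict.nodup_keys_insert _ _ _ hnd)))
  · exact PySem.Dict.nodup_keys_insert _ _ _ (PySem.Dict.nodup_keys_insert _ _ _ (PySem.Dict.nodup_keys_insert _ _ _ hnd))

theorem gsum_aStep (f : Int → Int) (d : PySem.Dict Int Int) (hnd : d.keys.Nodup) {m : Int}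
    (h4 : 4 ≤ m) :
    gsum f (aStep d m) = gsum f d + f (divide m) + f (m - divide m) - f m := by
  have hb := divide_bounds h4
  have hnw : divide m ≠ m := by omega
  have hlo : m - divide m ≠ m := by omega
  set nw := divide m with hnwdef
  set lo := m - divide m with hlodef
  set d1 := d.insert nw (d.getD nw 0 + 1) with hd1
  set d2 := d1.insert lo (d1.getD lo 0 + 1) with hd2
  set d3 := d2.insert m (d2.getD m 0 - 1) with hd3
  have hnd1 : d1.keys.Nodup := PySem.Dict.nodup_keys_insert _ _ _ hnd
  have hnd2 : d2.keys.Nodup := PySem.Dict.nodup_keys_insert _ _ _ hnd1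
  have hnd3 : d3.keys.Nodup := PySem.Dict.nodup_keys_insert _ _ _ hnd2
  have hg1 : gsum f d1 = gsum f d + f nw := by rw [hd1, gsum_insert f d hnd]; ring
  have hg2 : gsum f d2 = gsum f d1 + f lo := by rw [hd2, gsum_insert f d1 hnd1]; ring
  have hg3 : gsum f d3 = gsum f d2 - f m := by rw [hd3, gsum_insert f d2 hnd2]; ring
  have hd3m : d3.getD m 0 = d2.getD m 0 - 1 := by rw [hd3, PySem.Dict.getD_insert_self]
  show gsum f (if d3.getD m 0 == 0 then d3.erase m else d3) = _
  by_cases hz : d3.getD m 0 = 0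
  · have hmk : m ∈ d3.keys := by
      rw [hd3]
      exact (PySem.Dict.contains_iff_mem_keys _ _).1 (PySem.Dict.contains_insert_self _ _ _)
    rw [if_pos (by simpa using hz), gsum_erase_zero f d3 hnd3 hmk hz, hg3, hg2, hg1]
  · rw [if_neg (by simpa using hz), hg3, hg2, hg1]

theorem pureKeys_insert (d : PySem.Dict Int Int) (k v : Int) :
    pureKeys (d.insert k v)
      = if k ≤ 3 ∧ d.contains k = false then pureKeys d ++ [k] else pureKeys d := by
  by_cases hc : d.contains k
  · rw [if_neg (by simp [hc])]
    unfold pureKeys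
    rw [PySem.Dict.keys_insert_of_contains _ _ hc]
  · have hcf : d.contains k = false := by simpa using hc
    unfold pureKeys
    rw [PySem.Dict.keys_insert_of_not_contains _ _ hcf, List.filter_append]
    by_cases hk3 : k ≤ 3
    · rw [if_pos ⟨hk3, hcf⟩]
      simp [hk3]
    · rw [if_neg (by tauto)]
      simp [hk3]

theorem getD_insert' (d : PySem.Dict Int Int) (k v j : Int) :
    (d.insert k v).getD j 0 = if j = k then v else d.getD j 0 := PySem.Dict.getD_insert _ _ _ _ _

theorem contains_insert' (d : PySem.Dict Int Int) (k v j : Int) :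
    (d.insert k v).contains j = (j == k || d.contains j) := PySem.Dict.contains_insert _ _ _ _

-- the insert-m/decrement/maybe-erase tail of aStep does not touch pure keys
theorem aTail_pure (d2 : PySem.Dict Int Int) (m : Int) (h4 : 4 ≤ m)
    (hm2 : d2.contains m = true) :
    pureKeys (if (d2.insert m (d2.getD m 0 - 1)).getD m 0 == 0
        then (d2.insert m (d2.getD m 0 - 1)).erase m
        else (d2.insert m (d2.getD m 0 - 1))) = pureKeys d2
    ∧ ∀ j, j ≤ 3 →
      ((if (d2.insert m (d2.getD m 0 - 1)).getD m 0 == 0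
        then (d2.insert m (d2.getD m 0 - 1)).erase m
        else (d2.insert m (d2.getD m 0 - 1))).getD j 0 = d2.getD j 0
      ∧ (if (d2.insert m (d2.getD m 0 - 1)).getD m 0 == 0
        then (d2.insert m (d2.getD m 0 - 1)).erase m
        else (d2.insert m (d2.getD m 0 - 1))).contains j = d2.contains j) := by
  set d3 := d2.insert m (d2.getD m 0 - 1) with hd3
  have hkeys3 : d3.keys = d2.keys := PySem.Dict.keys_insert_of_contains _ _ hm2
  have hpure3 : pureKeys d3 = pureKeys d2 := by unfold pureKeys; rw [hkeys3]
  constructor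
  · split
    · unfold pureKeys
      rw [keys_erase, hkeys3, List.filter_filter]
      apply List.filter_congr
      intro j hj
      by_cases h3 : j ≤ 3 <;> simp [h3] <;> omega
    · exact hpure3
  · intro j hj
    have hjm : j ≠ m := by omega
    have hgd : d3.getD j 0 = d2.getD j 0 := by rw [hd3, getD_insert', if_neg hjm]
    have hct : d3.contains j = d2.contains j := by
      rw [hd3, contains_insert']; simp [hjm]
    constructor
    · split
      · rw [getD_erase_ne _ hjm, hgd]
      · exact hgd
    · split
      · rw [contains_erase_ne _ hjm, hct]
      · exact hct


theorem phi_master (d dr : PySem.Dict Int Int) (δ3 δ2 : Int)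
    (hδ3 : 0 ≤ δ3) (hδ2 : 0 ≤ δ2)
    (H1 : gsum g3' dr = gsum g3' d - δ3)
    (H2 : gsum g2' dr = gsum g2' d - δ2)
    (H3 : pureKeys dr = pureKeys d
        ++ (if d.contains 3 = false ∧ δ3 ≠ 0 then [3] else [])
        ++ (if d.contains 2 = false ∧ δ2 ≠ 0 then [2] else []))
    (H43 : dr.getD 3 0 = d.getD 3 0 + δ3)
    (H42 : dr.getD 2 0 = d.getD 2 0 + δ2)
    (H5 : ∀ j, j ≤ 1 → dr.getD j 0 = d.getD j 0)
    (HC3 : dr.contains 3 = (d.contains 3 || decide (δ3 ≠ 0)))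
    (HC2 : dr.contains 2 = (d.contains 2 || decide (δ2 ≠ 0)))
    (H73 : 0 < δ3 → 0 < gsum g3' d)
    (H72 : 0 < δ2 → 0 < gsum g2' d)
    (H8 : δ3 = 0 → δ2 ≠ 0 → gsum g3' d = 0)
    (HG30 : d.contains 3 = false → d.getD 3 0 = 0)
    (HG20 : d.contains 2 = false → d.getD 2 0 = 0) :
    phi dr = phi d := by
  have hmap : (pureKeys d).map (fun k => (k, dr.getD k 0 + extra dr k))
      = (pureKeys d).map (fun k => (k, d.getD k 0 + extra d k)) := by
    apply List.map_congr_left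
    intro j hj
    have hj3 : j ≤ 3 := by
      have := List.mem_filter.1 hj; simpa using this.2
    by_cases h3 : j = 3
    · subst h3
      simp [extra, H43, H1]
    · by_cases h2 : j = 2
      · subst h2
        simp [extra, H42, H2, h3]
      · have hj1 : j ≤ 1 := by omega
        simp [extra, H5 j hj1, h3, h2]
  unfold phi
  rw [H3, List.map_append, List.map_append, hmap, H1, H2, HC3, HC2]
  by_cases hz3 : δ3 = 0 <;> by_cases hz2 : δ2 = 0 <;>
    cases hc3 : d.contains 3 <;> cases hc2 : d.contains 2 <;>
    simp [hz3, hz2, extra, H43, H42, H1, H2, HG30, HG20, List.append_assoc] <;>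
    first
      | rfl
      | (have hE2 : 0 < gsum g2' d := H72 (by omega)
         simp [hE2, HG30, HG20, hc3, hc2]
         done)
      | (have hE3 : 0 < gsum g3' d := H73 (by omega)
         simp [hE3, HG30, HG20, hc3, hc2]
         done)
      | (have hE3 : 0 < gsum g3' d := H73 (by omega)
         have hE2 : 0 < gsum g2' d := H72 (by omega)
         simp [hE3, hE2, HG30, HG20, hc3, hc2]
         done)
      | (have hE3 : gsum g3' d = 0 := H8 hz3 hz2
         have hE2 : 0 < gsum g2' d := H72 (by omega)
         simp [hE3, hE2, HG30, HG20, hc3, hc2]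
         done)
      | (have hE3 : gsum g3' d = 0 := H8 hz3 hz2
         have hE2 : 0 < gsum g2' d := H72 (by omega)
         simp [hE3, hE2, HG20 hc2]
         done)
      | (have hE3 : 0 < gsum g3' d := H73 (by omega)
         have hE2 : 0 < gsum g2' d := H72 (by omega)
         simp [hE3, hE2, HG30 hc3, HG20 hc2]
         done)


theorem g3_rec {k : Int} (h : ¬ k ≤ 3) : g3 k = g3 (divide k) + g3 (k - divide k) := by
  rw [g3]; simp [h]

theorem g2_rec {k : Int} (h : ¬ k ≤ 3) : g2 k = g2 (divide k) + g2 (k - divide k) := by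
  rw [g2]; simp [h]

theorem divide_4 : divide 4 = 2 := by rw [divide_eq (by norm_num)]; decide
theorem divide_5 : divide 5 = 3 := by rw [divide_eq (by norm_num)]; decide
theorem divide_6 : divide 6 = 3 := by rw [divide_eq (by norm_num)]; decide
theorem divide_7 : divide 7 = 4 := by rw [divide_eq (by norm_num)]; decide

theorem g3_2 : g3 2 = 0 := by rw [g3]; decide
theorem g3_3 : g3 3 = 1 := by rw [g3]; decide
theorem g2_2 : g2 2 = 1 := by rw [g2]; decide
theorem g2_3 : g2 3 = 0 := by rw [g2]; decide
theorem g3_4 : g3 4 = 0 := by rw [g3_rec (by norm_num), divide_4]; norm_num [g3_2]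
theorem g2_4 : g2 4 = 2 := by rw [g2_rec (by norm_num), divide_4]; norm_num [g2_2]
theorem g3_5 : g3 5 = 1 := by rw [g3_rec (by norm_num), divide_5]; norm_num [g3_2, g3_3]
theorem g2_5 : g2 5 = 1 := by rw [g2_rec (by norm_num), divide_5]; norm_num [g2_2, g2_3]
theorem g3_6 : g3 6 = 2 := by rw [g3_rec (by norm_num), divide_6]; norm_num [g3_3]
theorem g2_6 : g2 6 = 0 := by rw [g2_rec (by norm_num), divide_6]; norm_num [g2_3]
theorem g3_7 : g3 7 = 1 := by rw [g3_rec (by norm_num), divide_7]; norm_num [g3_3, g3_4]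
theorem g2_7 : g2 7 = 2 := by rw [g2_rec (by norm_num), divide_7]; norm_num [g2_3, g2_4]

theorem g3_nonneg : ∀ (N : Nat) (k : Int), k.toNat ≤ N → 0 ≤ g3 k := by
  intro N
  induction N with
  | zero =>
    intro k hk
    rw [g3]
    have : k ≤ 3 := by omega
    simp [this]
    split <;> norm_num
  | succ n ih =>
    intro k hk
    by_cases h : k ≤ 3
    · rw [g3]; simp [h]; split <;> norm_num
    · have hb := divide_bounds (k := k) (by omega)
      rw [g3_rec h]
      have h1 := ih (divide k) (by omega)
      have h2 := ih (k - divide k) (by omega)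
      omega

theorem g2_nonneg : ∀ (N : Nat) (k : Int), k.toNat ≤ N → 0 ≤ g2 k := by
  intro N
  induction N with
  | zero =>
    intro k hk
    rw [g2]
    have : k ≤ 3 := by omega
    simp [this]
    split <;> norm_num
  | succ n ih =>
    intro k hk
    by_cases h : k ≤ 3
    · rw [g2]; simp [h]; split <;> norm_num
    · have hb := divide_bounds (k := k) (by omega)
      rw [g2_rec h]
      have h1 := ih (divide k) (by omega)
      have h2 := ih (k - divide k) (by omega)
      omega

theorem g3'_nonneg (j : Int) : 0 ≤ g3' j := by
  unfold g3'; split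
  · norm_num
  · exact g3_nonneg j.toNat j le_rfl

theorem g2'_nonneg (j : Int) : 0 ≤ g2' j := by
  unfold g2'; split
  · norm_num
  · exact g2_nonneg j.toNat j le_rfl

theorem wt_nonneg (j : Int) : 0 ≤ wt j := by unfold wt; split <;> omega

theorem wt_step {m : Int} (h4 : 4 ≤ m) :
    wt (divide m) + wt (m - divide m) - wt m ≤ -1 := by
  have hd := divide_eq (k := m) (by omega)
  unfold wt
  split_ifs <;> omega

theorem find?_filter_self {l : List (Int × Int)} {k : Int} :
    (l.filter (fun p => !(p.1 == k))).find? (fun p => p.1 == k) = none := by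
  induction l with
  | nil => rfl
  | cons p t ih =>
    by_cases hp : p.1 = k
    · simp [List.filter_cons, hp, ih]
    · simp [List.filter_cons, hp, List.find?_cons, ih]

theorem getD_erase_self (d : PySem.Dict Int Int) (k : Int) : (d.erase k).getD k 0 = 0 := by
  simp only [PySem.Dict.getD, PySem.Dict.get?, PySem.Dict.erase]
  rw [find?_filter_self]
  rfl

theorem mem_keys_erase {d : PySem.Dict Int Int} {k j : Int} :
    j ∈ (d.erase k).keys ↔ (j ∈ d.keys ∧ j ≠ k) := by
  rw [keys_erase]
  simp [List.mem_filter]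

-- destructuring aStep: its pure-key behaviour is that of the first two inserts
theorem aStep_destruct (d : PySem.Dict Int Int) (m : Int) (h4 : 4 ≤ m)
    (hm : d.contains m = true) :
    pureKeys (aStep d m)
      = pureKeys ((d.insert (divide m) (d.getD (divide m) 0 + 1)).insert (m - divide m)
          ((d.insert (divide m) (d.getD (divide m) 0 + 1)).getD (m - divide m) 0 + 1))
    ∧ ∀ j, j ≤ 3 →
      ((aStep d m).getD j 0
        = ((d.insert (divide m) (d.getD (divide m) 0 + 1)).insert (m - divide m)
          ((d.insert (divide m) (d.getD (divide m) 0 + 1)).getD (m - divide m) 0 + 1)).getD j 0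
      ∧ (aStep d m).contains j
        = ((d.insert (divide m) (d.getD (divide m) 0 + 1)).insert (m - divide m)
          ((d.insert (divide m) (d.getD (divide m) 0 + 1)).getD (m - divide m) 0 + 1)).contains j) := by
  have hb := divide_bounds h4
  set nw := divide m with hnw
  set lo := m - divide m with hlo
  set d1 := d.insert nw (d.getD nw 0 + 1) with hd1
  set d2 := d1.insert lo (d1.getD lo 0 + 1) with hd2
  have hm2 : d2.contains m = true := by
    rw [hd2, contains_insert', hd1, contains_insert']
    have h1 : (m == lo) = false := by simp; omega
    have h2 : (m == nw) = false := by simp; omega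
    simp [h1, h2, hm]
  have := aTail_pure d2 m h4 hm2
  exact this

theorem counts_aStep (d : PySem.Dict Int Int) (m : Int) (h4 : 4 ≤ m)
    (hm : m ∈ d.keys)
    (hc0 : ∀ j, 0 ≤ d.getD j 0) (hc1 : ∀ j ∈ d.keys, 1 ≤ d.getD j 0) :
    (∀ j, 0 ≤ (aStep d m).getD j 0) ∧ (∀ j ∈ (aStep d m).keys, 1 ≤ (aStep d m).getD j 0) := by
  have hb := divide_bounds h4
  unfold aStep
  dsimp only
  set nw := divide m with hnw
  set lo := m - divide m with hlo
  set d1 := d.insert nw (d.getD nw 0 + 1) with hd1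
  set d2 := d1.insert lo (d1.getD lo 0 + 1) with hd2
  set d3 := d2.insert m (d2.getD m 0 - 1) with hd3
  have hg1 : ∀ j, d1.getD j 0 = if j = nw then d.getD nw 0 + 1 else d.getD j 0 := by
    intro j; rw [hd1, getD_insert']
  have hg2 : ∀ j, d2.getD j 0 = if j = lo then d1.getD lo 0 + 1 else d1.getD j 0 := by
    intro j; rw [hd2, getD_insert']
  have hg3 : ∀ j, d3.getD j 0 = if j = m then d2.getD m 0 - 1 else d2.getD j 0 := by
    intro j; rw [hd3, getD_insert']
  have hm1 : 1 ≤ d.getD m 0 := hc1 m hm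
  have hd2m : d2.getD m 0 = d.getD m 0 := by
    rw [hg2, if_neg (by omega), hg1, if_neg (by omega)]
  have h10 : ∀ j, 0 ≤ d1.getD j 0 := by
    intro j; rw [hg1]; split <;> [skip; exact hc0 j]
    have := hc0 nw; omega
  have h20 : ∀ j, 0 ≤ d2.getD j 0 := by
    intro j; rw [hg2]; split <;> [skip; exact h10 j]
    have := h10 lo; omega
  have h30 : ∀ j, 0 ≤ d3.getD j 0 := by
    intro j; rw [hg3]; split <;> [skip; exact h20 j]
    omega
  have hmem1 : ∀ j ∈ d1.keys, j = nw ∨ j ∈ d.keys := by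
    intro j hj; exact (PySem.Dict.mem_keys_insert _ _ _ _).1 hj
  have hmem2 : ∀ j ∈ d2.keys, j = lo ∨ j ∈ d1.keys := by
    intro j hj; exact (PySem.Dict.mem_keys_insert _ _ _ _).1 hj
  have hmem3 : ∀ j ∈ d3.keys, j = m ∨ j ∈ d2.keys := by
    intro j hj; exact (PySem.Dict.mem_keys_insert _ _ _ _).1 hj
  have hk1 : ∀ j ∈ d1.keys, 1 ≤ d1.getD j 0 := by
    intro j hj
    rw [hg1]; split
    · have := hc0 nw; omega
    · rename_i hne
      rcases hmem1 j hj with h | h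
      · exact absurd h hne
      · exact hc1 j h
  have hk2 : ∀ j ∈ d2.keys, 1 ≤ d2.getD j 0 := by
    intro j hj
    rw [hg2]; split
    · have := h10 lo; omega
    · rename_i hne
      rcases hmem2 j hj with h | h
      · exact absurd h hne
      · exact hk1 j h
  split
  · -- erase branch
    rename_i hz
    have hz' : d3.getD m 0 = 0 := by simpa using hz
    constructor
    · intro j
      by_cases hjm : j = m
      · subst hjm; rw [getD_erase_self]
      · rw [getD_erase_ne _ hjm]; exact h30 j
    · intro j hj
      obtain ⟨hj3, hjm⟩ := mem_keys_erase.1 hj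
      rw [getD_erase_ne _ hjm, hg3, if_neg hjm]
      rcases hmem3 j hj3 with h | h
      · omega
      · exact hk2 j h
  · rename_i hz
    have hz' : ¬ d3.getD m 0 = 0 := by simpa using hz
    rw [hg3, hd2m] at hz'
    simp at hz'
    constructor
    · exact h30
    · intro j hj
      rw [hg3]
      split
      · rw [hd2m]; omega
      · rename_i hne
        rcases hmem3 j hj with h | h
        · exact absurd h hne
        · exact hk2 j h

theorem phi_aStep (d : PySem.Dict Int Int) (m : Int) (hnd : d.keys.Nodup)
    (hc0 : ∀ j, 0 ≤ d.getD j 0) (hc1 : ∀ j ∈ d.keys, 1 ≤ d.getD j 0)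
    (hm : m ∈ d.keys) (hmax : ∀ y ∈ d.keys, y ≤ m) (h4 : 4 ≤ m) :
    phi (aStep d m) = phi d := by
  have hb := divide_bounds h4
  have hcont : d.contains m = true := (PySem.Dict.contains_iff_mem_keys d m).2 hm
  obtain ⟨hpure, hjfacts⟩ := aStep_destruct d m h4 hcont
  have hgs3 := gsum_aStep g3' d hnd h4
  have hgs2 := gsum_aStep g2' d hnd h4
  have hHG30 : d.contains 3 = false → d.getD 3 0 = 0 := fun h => PySem.Dict.getD_of_not_contains _ _ h
  have hHG20 : d.contains 2 = false → d.getD 2 0 = 0 := fun h => PySem.Dict.getD_of_not_contains _ _ h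
  set nw := divide m with hnw
  set lo := m - divide m with hlo
  set d1 := d.insert nw (d.getD nw 0 + 1) with hd1
  set d2 := d1.insert lo (d1.getD lo 0 + 1) with hd2
  have hp1 := pureKeys_insert d nw (d.getD nw 0 + 1)
  have hp2 := pureKeys_insert d1 lo (d1.getD lo 0 + 1)
  have hg1 : ∀ j, d1.getD j 0 = if j = nw then d.getD nw 0 + 1 else d.getD j 0 := by
    intro j; rw [hd1, getD_insert']
  have hg2 : ∀ j, d2.getD j 0 = if j = lo then d1.getD lo 0 + 1 else d1.getD j 0 := by
    intro j; rw [hd2, getD_insert']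
  have hct1 : ∀ j, d1.contains j = (j == nw || d.contains j) := by
    intro j; rw [hd1, contains_insert']
  have hct2 : ∀ j, d2.contains j = (j == lo || d1.contains j) := by
    intro j; rw [hd2, contains_insert']
  by_cases h8 : 8 ≤ m
  · -- children both impure
    have hnw4 : 4 ≤ nw := by rw [hnw, divide_eq (by omega)]; omega
    have hlo4 : 4 ≤ lo := by rw [hlo, divide_eq (by omega)]; omega
    apply phi_master d (aStep d m) 0 0 le_rfl le_rfl
    · rw [hgs3]
      have : g3' nw + g3' lo - g3' m = 0 := by
        unfold g3'
        rw [if_neg (by omega), if_neg (by omega), if_neg (by omega), g3_rec (k := m) (by omega)]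
        ring
      omega
    · rw [hgs2]
      have : g2' nw + g2' lo - g2' m = 0 := by
        unfold g2'
        rw [if_neg (by omega), if_neg (by omega), if_neg (by omega), g2_rec (k := m) (by omega)]
        ring
      omega
    · rw [hpure, hp2, hp1]
      rw [if_neg (by omega), if_neg (by omega)]
      simp
    · rw [(hjfacts 3 (by omega)).1, hg2, if_neg (by omega), hg1, if_neg (by omega)]
      ring
    · rw [(hjfacts 2 (by omega)).1, hg2, if_neg (by omega), hg1, if_neg (by omega)]
      ring
    · intro j hj
      rw [(hjfacts j (by omega)).1, hg2, if_neg (by omega), hg1, if_neg (by omega)]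
    · rw [(hjfacts 3 (by omega)).2, hct2, hct1]
      have e1 : ((3:Int) == lo) = false := by simp; omega
      have e2 : ((3:Int) == nw) = false := by simp; omega
      simp [e1, e2]
    · rw [(hjfacts 2 (by omega)).2, hct2, hct1]
      have e1 : ((2:Int) == lo) = false := by simp; omega
      have e2 : ((2:Int) == nw) = false := by simp; omega
      simp [e1, e2]
    · intro h; omega
    · intro h; omega
    · intro h; omega
    · exact hHG30
    · exact hHG20
  ·
    have hmv4 : m = 4 ∨ m = 5 ∨ m = 6 ∨ m = 7 := by omega
    rcases hmv4 with hmv | hmv | hmv | hmv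

    · -- m = 4
      subst hmv
      have hv : nw = 2 := by rw [hnw]; exact divide_4
      have hlv : lo = 2 := by rw [hlo, divide_4]; norm_num
      apply phi_master d (aStep d 4) 0 2 (by norm_num) (by norm_num)
      · rw [hgs3]
        have : g3' nw + g3' lo - g3' 4 = -0 := by
          simp [g3', hv, hlv, g3_4, g3_4]
        omega
      · rw [hgs2]
        have : g2' nw + g2' lo - g2' 4 = -2 := by
          simp [g2', hv, hlv, g2_4, g2_4]
        omega
      · rw [hpure, hp2, hct1, hp1, hv, hlv]
        by_cases hc3 : d.contains 3 <;> by_cases hc2 : d.contains 2 <;>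
          simp [hc3, hc2]
      · rw [(hjfacts 3 (by norm_num)).1]
        simp only [hg2, hg1, hv, hlv]
        norm_num
        try ring
      · rw [(hjfacts 2 (by norm_num)).1]
        simp only [hg2, hg1, hv, hlv]
        norm_num
        try ring
      · intro j hj
        rw [(hjfacts j (by omega)).1, hg2, if_neg (by omega), hg1, if_neg (by omega)]
      · rw [(hjfacts 3 (by norm_num)).2, hct2, hct1, hv, hlv]
        simp
      · rw [(hjfacts 2 (by norm_num)).2, hct2, hct1, hv, hlv]
        simp
      · intro h; norm_num at h
      · intro _; exact gsum_pos g2' d hc0 g2'_nonneg hm (hc1 _ hm) (by simp [g2', g2_4])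
      · intro _ _
        apply gsum_eq_zero
        intro j hj
        have hj4 : j ≤ 4 := hmax j hj
        unfold g3'
        by_cases hj3 : j ≤ 3
        · rw [if_pos hj3]
        · have : j = 4 := by omega
          rw [if_neg hj3, this, g3_4]
      · exact hHG30
      · exact hHG20

    · -- m = 5
      subst hmv
      have hv : nw = 3 := by rw [hnw]; exact divide_5
      have hlv : lo = 2 := by rw [hlo, divide_5]; norm_num
      apply phi_master d (aStep d 5) 1 1 (by norm_num) (by norm_num)
      · rw [hgs3]
        have : g3' nw + g3' lo - g3' 5 = -1 := by
          simp [g3', hv, hlv, g3_4, g3_5]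
        omega
      · rw [hgs2]
        have : g2' nw + g2' lo - g2' 5 = -1 := by
          simp [g2', hv, hlv, g2_4, g2_5]
        omega
      · rw [hpure, hp2, hct1, hp1, hv, hlv]
        by_cases hc3 : d.contains 3 <;> by_cases hc2 : d.contains 2 <;>
          simp [hc3, hc2]
      · rw [(hjfacts 3 (by norm_num)).1]
        simp only [hg2, hg1, hv, hlv]
        norm_num
        try ring
      · rw [(hjfacts 2 (by norm_num)).1]
        simp only [hg2, hg1, hv, hlv]
        norm_num
        try ring
      · intro j hj
        rw [(hjfacts j (by omega)).1, hg2, if_neg (by omega), hg1, if_neg (by omega)]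
      · rw [(hjfacts 3 (by norm_num)).2, hct2, hct1, hv, hlv]
        simp
      · rw [(hjfacts 2 (by norm_num)).2, hct2, hct1, hv, hlv]
        simp
      · intro _; exact gsum_pos g3' d hc0 g3'_nonneg hm (hc1 _ hm) (by simp [g3', g3_5])
      · intro _; exact gsum_pos g2' d hc0 g2'_nonneg hm (hc1 _ hm) (by simp [g2', g2_5])
      · intro h; norm_num at h
      · exact hHG30
      · exact hHG20

    · -- m = 6
      subst hmv
      have hv : nw = 3 := by rw [hnw]; exact divide_6
      have hlv : lo = 3 := by rw [hlo, divide_6]; norm_num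
      apply phi_master d (aStep d 6) 2 0 (by norm_num) (by norm_num)
      · rw [hgs3]
        have : g3' nw + g3' lo - g3' 6 = -2 := by
          simp [g3', hv, hlv, g3_4, g3_6]
        omega
      · rw [hgs2]
        have : g2' nw + g2' lo - g2' 6 = -0 := by
          simp [g2', hv, hlv, g2_4, g2_6]
        omega
      · rw [hpure, hp2, hct1, hp1, hv, hlv]
        by_cases hc3 : d.contains 3 <;> by_cases hc2 : d.contains 2 <;>
          simp [hc3, hc2]
      · rw [(hjfacts 3 (by norm_num)).1]
        simp only [hg2, hg1, hv, hlv]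
        norm_num
        try ring
      · rw [(hjfacts 2 (by norm_num)).1]
        simp only [hg2, hg1, hv, hlv]
        norm_num
        try ring
      · intro j hj
        rw [(hjfacts j (by omega)).1, hg2, if_neg (by omega), hg1, if_neg (by omega)]
      · rw [(hjfacts 3 (by norm_num)).2, hct2, hct1, hv, hlv]
        simp
      · rw [(hjfacts 2 (by norm_num)).2, hct2, hct1, hv, hlv]
        simp
      · intro _; exact gsum_pos g3' d hc0 g3'_nonneg hm (hc1 _ hm) (by simp [g3', g3_6])
      · intro h; norm_num at h
      · intro h; norm_num at h
      · exact hHG30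
      · exact hHG20

    · -- m = 7
      subst hmv
      have hv : nw = 4 := by rw [hnw]; exact divide_7
      have hlv : lo = 3 := by rw [hlo, divide_7]; norm_num
      apply phi_master d (aStep d 7) 1 0 (by norm_num) (by norm_num)
      · rw [hgs3]
        have : g3' nw + g3' lo - g3' 7 = -1 := by
          simp [g3', hv, hlv, g3_4, g3_7]
        omega
      · rw [hgs2]
        have : g2' nw + g2' lo - g2' 7 = -0 := by
          simp [g2', hv, hlv, g2_4, g2_7]
        omega
      · rw [hpure, hp2, hct1, hp1, hv, hlv]
        by_cases hc3 : d.contains 3 <;> by_cases hc2 : d.contains 2 <;>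
          simp [hc3, hc2]
      · rw [(hjfacts 3 (by norm_num)).1]
        simp only [hg2, hg1, hv, hlv]
        norm_num
        try ring
      · rw [(hjfacts 2 (by norm_num)).1]
        simp only [hg2, hg1, hv, hlv]
        norm_num
        try ring
      · intro j hj
        rw [(hjfacts j (by omega)).1, hg2, if_neg (by omega), hg1, if_neg (by omega)]
      · rw [(hjfacts 3 (by norm_num)).2, hct2, hct1, hv, hlv]
        simp
      · rw [(hjfacts 2 (by norm_num)).2, hct2, hct1, hv, hlv]
        simp
      · intro _; exact gsum_pos g3' d hc0 g3'_nonneg hm (hc1 _ hm) (by simp [g3', g3_7])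
      · intro h; norm_num at h
      · intro h; norm_num at h
      · exact hHG30
      · exact hHG20

theorem phi_pure (d : PySem.Dict Int Int) (hnd : d.keys.Nodup)
    (hall : ∀ j ∈ d.keys, j ≤ 3) : phi d = d.items := by
  have hE3 : gsum g3' d = 0 := gsum_eq_zero _ _ (fun j hj => by
    unfold g3'; rw [if_pos (hall j hj)])
  have hE2 : gsum g2' d = 0 := gsum_eq_zero _ _ (fun j hj => by
    unfold g2'; rw [if_pos (hall j hj)])
  unfold phi
  rw [hE3, hE2]
  have hpk : pureKeys d = d.keys := List.filter_eq_self.2 (fun j hj => by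
    simpa using hall j hj)
  rw [hpk]
  have hmap : d.keys.map (fun k => (k, d.getD k 0 + extra d k))
      = d.keys.map (fun k => (k, d.getD k 0)) :=
    List.map_congr_left (fun j hj => by
      unfold extra
      rw [hE3, hE2]
      split_ifs <;> simp)
  rw [hmap, ← PySem.Dict.items_eq_map_keys d hnd 0]
  simp

theorem aLoop_phi : ∀ (fuel : Nat) (d : PySem.Dict Int Int),
    d.keys.Nodup → (∀ j, 0 ≤ d.getD j 0) → (∀ j ∈ d.keys, 1 ≤ d.getD j 0) →
    gsum wt d < (fuel : Int) → (aLoop fuel d).items = phi d := by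
  intro fuel
  induction fuel with
  | zero =>
    intro d _ hc0 _ hW
    have := gsum_nonneg wt d hc0 wt_nonneg
    simp at hW
    omega
  | succ f ih =>
    intro d hnd hc0 hc1 hW
    show (match PySem.List.max? d.keys (fun x => x) with
      | none => d
      | some m => if m ≤ 3 then d else aLoop f (aStep d m)).items = phi d
    cases hmx : PySem.List.max? d.keys (fun x => x) with
    | none =>
      have hkeys : d.keys = [] := (PySem.List.max?_eq_none_iff _ _).1 hmx
      have hitems : d.items = [] := by
        have : d.items.map Prod.fst = [] := hkeys
        exact List.map_eq_nil_iff.1 this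
      have hd : d = PySem.Dict.mk [] := PySem.Dict.ext hitems
      subst hd
      rfl
    | some m =>
      have hmem : m ∈ d.keys := PySem.List.max?_mem hmx
      have hmax : ∀ y ∈ d.keys, y ≤ m := PySem.List.max?_isMax hmx
      show (if m ≤ 3 then d else aLoop f (aStep d m)).items = phi d
      by_cases hm3 : m ≤ 3
      · rw [if_pos hm3]
        exact (phi_pure d hnd (fun j hj => le_trans (hmax j hj) hm3)).symm
      · rw [if_neg hm3]
        have h4 : 4 ≤ m := by omega
        obtain ⟨hs0, hs1⟩ := counts_aStep d m h4 hmem hc0 hc1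
        have hndr := nodup_aStep d m hnd
        have hWr : gsum wt (aStep d m) ≤ gsum wt d - 1 := by
          rw [gsum_aStep wt d hnd h4]
          have := wt_step h4
          omega
        rw [ih (aStep d m) hndr hs0 hs1 (by push_cast at hW ⊢; omega)]
        exact phi_aStep d m hnd hc0 hc1 hmem hmax h4

theorem altFind_spec : ∀ (N : Nat) (n : Int) (c : Nat), n.toNat ≤ N → 2 ≤ n →
    ∃ v : Int, ∃ e : Nat, altFind n c = (v, c + e) ∧ (v = 2 ∨ v = 3) ∧
      v * 2 ^ e ≤ n ∧ n < (v + 1) * 2 ^ e := by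
  intro N
  induction N with
  | zero => intro n c hN h2; omega
  | succ N ih =>
    intro n c hN h2
    by_cases h3 : 3 < n
    · rw [altFind, dif_pos h3, PySem.Int.floordiv_eq_ediv_of_pos (by omega)]
      obtain ⟨v, e, heq, hv, hlow, hhigh⟩ := ih (n / 2) (c + 1) (by omega) (by omega)
      refine ⟨v, e + 1, ?_, hv, ?_, ?_⟩
      · rw [heq]; congr 1; omega
      · have hP : (0:Int) < 2 ^ e := by positivity
        have h2e : (2:Int) ^ (e + 1) = 2 * 2 ^ e := by ring
        rcases hv with rfl | rfl <;> omega
      · have hP : (0:Int) < 2 ^ e := by positivity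
        have h2e : (2:Int) ^ (e + 1) = 2 * 2 ^ e := by ring
        rcases hv with rfl | rfl <;> omega
    · rw [altFind, dif_neg h3]
      refine ⟨n, 0, by simp, by omega, ?_, ?_⟩ <;> simp <;> omega

theorem gclosed : ∀ (N : Nat) (n : Int), n.toNat ≤ N → 2 ≤ n →
    ∀ (v : Int) (e : Nat) (r : Int), (v = 2 ∨ v = 3) → 0 ≤ r → r < 2 ^ e →
    n = v * 2 ^ e + r →
    g3 n = (if v = 3 then 2 ^ e - r else r) ∧ g2 n = (if v = 3 then 2 * r else 2 ^ e - r) := by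
  intro N
  induction N with
  | zero => intro n hN h2; omega
  | succ N ih =>
    intro n hN h2 v e r hv hr0 hre hn
    by_cases hn3 : n ≤ 3
    · -- then e = 0, r = 0, v = n
      have hP1 : (0:Int) < 2 ^ e := by positivity
      by_cases he : e = 0
      · subst he
        simp only [pow_zero] at hn hre ⊢
        have : r = 0 := by omega
        subst this
        rcases hv with rfl | rfl
        · have : n = 2 := by omega
          subst this
          simp [g3_2, g2_2]
        · have : n = 3 := by omega
          subst this
          simp [g3_3, g2_3]
      · obtain ⟨f, rfl⟩ : ∃ f, e = f + 1 := ⟨e - 1, by omega⟩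
        have hPf : (0:Int) < 2 ^ f := by positivity
        have h2e : (2:Int) ^ (f + 1) = 2 * 2 ^ f := by ring
        rcases hv with rfl | rfl <;> omega
    · -- n ≥ 4 : recurse on the two halves
      have h4 : 4 ≤ n := by omega
      obtain ⟨f, rfl⟩ : ∃ f, e = f + 1 := by
        rcases Nat.eq_zero_or_pos e with he | he
        · subst he; simp only [pow_zero] at hn hre; omega
        · exact ⟨e - 1, by omega⟩
      have hPf : (0:Int) < 2 ^ f := by positivity
      have h2e : (2:Int) ^ (f + 1) = 2 * 2 ^ f := by ring
      have hda : divide n = (n + 1) / 2 := divide_eq (by omega)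
      have hg3n : g3 n = g3 (divide n) + g3 (n - divide n) := g3_rec (by omega)
      have hg2n : g2 n = g2 (divide n) + g2 (n - divide n) := g2_rec (by omega)
      set a := divide n with ha
      set b := n - divide n with hb
      have hab : a = (n + 1) / 2 := hda
      have hbb : b = n / 2 := by omega
      have haN : a.toNat ≤ N := by omega
      have hbN : b.toNat ≤ N := by omega
      have ha2 : 2 ≤ a := by omega
      have hb2 : 2 ≤ b := by omega
      by_cases hrB : r = 2 * 2 ^ f - 1
      · -- carry case: a = (v+1) * 2^f
        rcases hv with rfl | rfl
        · have hbdec := ih b hbN hb2 2 f (r / 2) (Or.inl rfl) (by omega) (by omega) (by omega)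
          have hadec := ih a haN ha2 3 f 0 (by omega) (by omega) (by omega) (by omega)
          norm_num at hadec hbdec ⊢
          constructor <;> omega
        · have hbdec := ih b hbN hb2 3 f (r / 2) (Or.inr rfl) (by omega) (by omega) (by omega)
          have hadec := ih a haN ha2 2 (f + 1) 0 (by omega) (by omega)
            (by omega) (by omega)
          have h2e2 : (2:Int) ^ (f + 1 + 1) = 2 * 2 ^ (f + 1) := by ring
          norm_num at hadec hbdec ⊢
          constructor <;> omega
      · -- no carry: a = v * 2^f + (r+1)/2
        rcases hv with rfl | rfl
        · have hbdec := ih b hbN hb2 2 f (r / 2) (Or.inl rfl) (by omega) (by omega) (by omega)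
          have hadec := ih a haN ha2 2 f ((r + 1) / 2) (Or.inl rfl) (by omega) (by omega) (by omega)
          norm_num at hadec hbdec ⊢
          constructor <;> omega
        · have hbdec := ih b hbN hb2 3 f (r / 2) (Or.inr rfl) (by omega) (by omega) (by omega)
          have hadec := ih a haN ha2 3 f ((r + 1) / 2) (Or.inr rfl) (by omega) (by omega) (by omega)
          norm_num at hadec hbdec ⊢
          constructor <;> omega

-- ===== VERDICT (by name: the statement is the Claim_ definition above) =====
theorem max_list_spec : Claim_equal_max_list := by
  intro n _hdom
  show max_list n = max_list_alt n
  unfold max_list max_list_alt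
  have hce : (PySem.Dict.empty : PySem.Dict Int Int).contains n = false := by
    simp [PySem.Dict.contains_empty]
  have hge : (PySem.Dict.empty : PySem.Dict Int Int).getD n 0 = 0 := by
    simp [PySem.Dict.getD_empty]
  set d0 := (PySem.Dict.empty : PySem.Dict Int Int).insert n
      ((PySem.Dict.empty : PySem.Dict Int Int).getD n 0 + 1) with hd0
  have hitems0 : d0.items = [(n, 1)] := by
    rw [hd0, PySem.Dict.items_insert_of_not_contains _ _ hce, hge]
    rfl
  have hkeys0 : d0.keys = [n] := by
    show d0.items.map Prod.fst = [n]
    rw [hitems0]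
    rfl
  have hgd0 : ∀ j, d0.getD j 0 = if j = n then 1 else 0 := by
    intro j
    rw [hd0, PySem.Dict.getD_insert, hge]
    by_cases h : j = n <;> simp [h, PySem.Dict.getD_empty]
  by_cases hn3 : n ≤ 3
  · rw [if_pos hn3]
    show (aLoop (n.natAbs + 1) d0).items = [(n, 1)]
    rw [show aLoop (n.natAbs + 1) d0
        = (match PySem.List.max? d0.keys (fun x => x) with
          | none => d0
          | some m => if m ≤ 3 then d0 else aLoop n.natAbs (aStep d0 m)) from rfl]
    rw [hkeys0, PySem.List.max?_id_cons]
    simp only [List.foldl_nil]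
    rw [if_pos hn3]
    exact hitems0
  · rw [if_neg hn3]
    have h4 : 4 ≤ n := by omega
    have hnd0 : d0.keys.Nodup := by rw [hkeys0]; simp
    have hc00 : ∀ j, 0 ≤ d0.getD j 0 := by
      intro j; rw [hgd0]; split <;> omega
    have hc10 : ∀ j ∈ d0.keys, 1 ≤ d0.getD j 0 := by
      intro j hj
      rw [hkeys0] at hj
      simp at hj
      rw [hgd0, if_pos hj]
    have hW0 : gsum wt d0 = wt n := by
      unfold gsum
      rw [hkeys0]
      simp [hgd0]
    have hfuel : gsum wt d0 < ((n.natAbs + 1 : Nat) : Int) := by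
      rw [hW0]
      unfold wt
      rw [if_neg (by omega)]
      omega
    rw [aLoop_phi (n.natAbs + 1) d0 hnd0 hc00 hc10 hfuel]
    -- phi of the singleton {n: 1}
    have hgs3 : gsum g3' d0 = g3 n := by
      unfold gsum
      rw [hkeys0]
      simp only [List.map_cons, List.map_nil, List.sum_cons, List.sum_nil]
      rw [hgd0, if_pos rfl]
      unfold g3'
      rw [if_neg (by omega)]
      ring
    have hgs2 : gsum g2' d0 = g2 n := by
      unfold gsum
      rw [hkeys0]
      simp only [List.map_cons, List.map_nil, List.sum_cons, List.sum_nil]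
      rw [hgd0, if_pos rfl]
      unfold g2'
      rw [if_neg (by omega)]
      ring
    have hct3 : d0.contains 3 = false := by
      rw [PySem.Dict.contains_eq_decide_mem_keys, hkeys0]
      simp
      omega
    have hct2 : d0.contains 2 = false := by
      rw [PySem.Dict.contains_eq_decide_mem_keys, hkeys0]
      simp
      omega
    have hpk0 : pureKeys d0 = [] := by
      unfold pureKeys
      rw [hkeys0]
      simp
      omega
    unfold phi
    rw [hpk0, hgs3, hgs2, hct3, hct2]
    simp only [List.map_nil, List.nil_append, true_and]
    -- closed form for g3 n / g2 n
    obtain ⟨v, e, haf, hv, hlow, hhigh⟩ := altFind_spec n.toNat n 0 le_rfl (by omega)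
    have hP : (0:Int) < 2 ^ e := by positivity
    set r := n - v * 2 ^ e with hr
    have hr0 : 0 ≤ r := by omega
    have hre : r < 2 ^ e := by rcases hv with rfl | rfl <;> omega
    obtain ⟨hcl3, hcl2⟩ := gclosed n.toNat n le_rfl (by omega) v e r hv hr0 hre (by omega)
    rw [haf]
    simp only [Nat.zero_add]
    rcases hv with rfl | rfl
    · -- v = 2
      norm_num at hcl3 hcl2
      rw [hcl3, hcl2]
      have hrr : n - 2 * 2 ^ e = r := by omega
      rw [hrr]
      norm_num
      have h2p : 0 < 2 ^ e - r := by omega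
      by_cases hrz : r = 0
      · simp [hrz, h2p]
      · have hrp : 0 < r := by omega
        simp [hrz, hrp, hre, h2p]
    · -- v = 3
      norm_num at hcl3 hcl2
      rw [hcl3, hcl2]
      have hrr : n - 3 * 2 ^ e = r := by omega
      rw [hrr]
      norm_num
      have h3p : 0 < 2 ^ e - r := by omega
      by_cases hrz : r = 0
      · simp [hrz, h3p]
      · have hrp : 0 < r := by omega
        simp [hrz, hrp, hre, h3p]
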